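-- pv_equiv track=rewrite | github.com/gauthierdmn/nominal-code | app/nominal_code/agent/compaction.py | _extract_summary_highlights
-- ===== SOURCE A (Python) =====
-- def _extract_summary_highlights(summary: str) -> list[str]:
--     """
--     Extract non-timeline highlight lines from a summary.
--
--     Skips the ``- Key timeline:`` header and all indented entries below it.
--
--     Args:
--         summary (str): The summary text.
--
--     Returns:
--         list[str]: Highlight lines (everything except timeline).
--     """
--
--     lines: list[str] = []
--     in_timeline: bool = False
--
--     for line in summary.splitlines():
--         trimmed: str = line.rstrip()
--
--         if not trimmed:
--             continue
--
--         if trimmed == "- Key timeline:":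
--             in_timeline = True
--             continue
--
--         if in_timeline:
--             continue
--
--         lines.append(trimmed)
--
--     return lines
-- ===== SOURCE B (Python) =====
-- def _extract_summary_highlights(summary: str) -> list[str]:
--     """Highlight lines: everything before the '- Key timeline:' header, non-empty after rstrip."""
--     stripped = [line.rstrip() for line in summary.splitlines()]
--     if "- Key timeline:" in stripped:
--         stripped = stripped[:stripped.index("- Key timeline:")]
--     return [line for line in stripped if line]
-- ===== Notes on version B (the rewrite author's own statement) =====
-- stated objective: simpler
-- what changed: Replaces A's stateful in_timeline flag loop with a pipeline: rstrip all lines, cut the list at the first '- Key timeline:' header via index/slice, then filter non-empty lines.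
import Mathlib
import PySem

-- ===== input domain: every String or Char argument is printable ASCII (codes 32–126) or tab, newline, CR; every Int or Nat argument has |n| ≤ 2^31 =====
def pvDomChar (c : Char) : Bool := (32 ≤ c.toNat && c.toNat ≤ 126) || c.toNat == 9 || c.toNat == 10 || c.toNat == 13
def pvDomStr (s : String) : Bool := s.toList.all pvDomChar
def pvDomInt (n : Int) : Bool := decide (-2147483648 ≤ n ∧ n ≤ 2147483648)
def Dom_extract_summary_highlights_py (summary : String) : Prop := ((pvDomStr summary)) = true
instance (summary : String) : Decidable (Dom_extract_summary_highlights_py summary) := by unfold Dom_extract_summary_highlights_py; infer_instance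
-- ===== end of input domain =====

-- B replaces A's stateful in_timeline flag loop by a cut-at-header-then-filter pipeline (simpler decomposition, same cost).

-- ===== PORT A =====
-- A's loop body: state = (lines, in_timeline); branches in A's order.
def pvStepA (st : List String × Bool) (line : String) : List String × Bool :=
  let trimmed := PySem.Str.rstrip line
  if trimmed = "" then st
  else if trimmed = "- Key timeline:" then (st.1, true)
  else if st.2 then st
  else (st.1 ++ [trimmed], st.2)

def extract_summary_highlights_py (summary : String) : List String :=
  ((PySem.Str.splitlines summary).foldl pvStepA ([], false)).1

-- ===== PORT B =====
def extract_summary_highlights_py_alt (summary : String) : List String :=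
  let stripped := (PySem.Str.splitlines summary).map PySem.Str.rstrip
  let cut := match PySem.List.index? stripped "- Key timeline:" with
    | some k => stripped.take k          -- stripped[:k]
    | none => stripped
  cut.filter (fun line => line ≠ "")

-- ===== PRECONDITION & SPEC =====
def Spec_extract_summary_highlights_py (summary : String) (out : List String) : Prop := out = extract_summary_highlights_py_alt summary
instance (summary : String) (out : List String) : Decidable (Spec_extract_summary_highlights_py summary out) := by unfold Spec_extract_summary_highlights_py; infer_instance

-- ===== CLAIM (what is proved, stated in full; the proofs are below) =====
def Claim_equal_extract_summary_highlights_py : Prop := ∀ (summary : String), Dom_extract_summary_highlights_py summary → Spec_extract_summary_highlights_py summary (extract_summary_highlights_py summary)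

-- ===== LEMMAS AND PROOFS =====

-- A's step on an already-rstripped line
def pvStepT (st : List String × Bool) (trimmed : String) : List String × Bool :=
  if trimmed = "" then st
  else if trimmed = "- Key timeline:" then (st.1, true)
  else if st.2 then st
  else (st.1 ++ [trimmed], st.2)

-- once in_timeline is set, A never appends again
lemma pvFoldT_true (ts : List String) (acc : List String) :
    (ts.foldl pvStepT (acc, true)).1 = acc := by
  induction ts generalizing acc with
  | nil => rfl
  | cons t ts ih =>
      simp only [List.foldl_cons, pvStepT]
      split_ifs <;> exact ih acc

-- main invariant: from flag = false, the fold yields acc ++ (cut-at-header, filter non-empty)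
lemma pvFoldT_false (ts : List String) (acc : List String) :
    (ts.foldl pvStepT (acc, false)).1 =
      acc ++ (match PySem.List.index? ts "- Key timeline:" with
              | some k => ts.take k
              | none => ts).filter (fun line => line ≠ "") := by
  induction ts generalizing acc with
  | nil => simp [PySem.List.index?]
  | cons t ts ih =>
      by_cases h1 : t = ""
      · subst h1
        rw [PySem.List.index?_cons_of_ne ts (show ("" : String) ≠ "- Key timeline:" by decide)]
        simp only [List.foldl_cons, pvStepT, reduceIte]
        rw [ih acc]
        cases PySem.List.index? ts "- Key timeline:" <;> simp
      · by_cases h2 : t = "- Key timeline:"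
        · subst h2
          rw [PySem.List.index?_cons_self]
          simp only [List.foldl_cons, pvStepT, reduceIte,
            if_neg (show ¬("- Key timeline:" : String) = "" by decide)]
          rw [pvFoldT_true ts acc]
          simp
        · rw [PySem.List.index?_cons_of_ne ts (show t ≠ "- Key timeline:" from fun he => h2 he)]
          simp only [List.foldl_cons, pvStepT, if_neg h1, if_neg h2,
            if_neg (Bool.false_ne_true)]
          rw [ih (acc ++ [t])]
          cases PySem.List.index? ts "- Key timeline:" <;> simp [h1]

-- ===== VERDICT (by name: the statement is the Claim_ definition above) =====
theorem extract_summary_highlights_py_spec : Claim_equal_extract_summary_highlights_py := by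
  intro summary _
  unfold Spec_extract_summary_highlights_py extract_summary_highlights_py extract_summary_highlights_py_alt
  have hmap : (PySem.Str.splitlines summary).foldl pvStepA ([], false) =
      ((PySem.Str.splitlines summary).map PySem.Str.rstrip).foldl pvStepT ([], false) := by
    rw [List.foldl_map]
    rfl
  rw [hmap, pvFoldT_false]
  simp
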